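-- pv_equiv track=rewrite | github.com/Asteur/Google-searchbot | googlesearch/spiders/googlespider.py | join_punctuation
-- ===== SOURCE A (Python) =====
-- def join_punctuation(seq, characters=".,;:?!'"):
--
--     text = ''
--     count = 0
--     for nxt in seq:
--         if nxt in characters or count == 0:
--             text += nxt
--         else:
--             text += ' ' + nxt
--         count += 1
--     return text
-- ===== SOURCE B (Python) =====
-- def join_punctuation(seq, characters=".,;:?!'"):
--     def groups(seq):
--         it = iter(seq)
--         try:
--             current = next(it)
--         except StopIteration:
--             return
--         for nxt in it:
--             if nxt in characters:
--                 current += nxt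
--             else:
--                 yield current
--                 current = nxt
--         yield current
--     return ' '.join(groups(seq))
-- ===== Notes on version B (the rewrite author's own statement) =====
-- stated objective: idiomatic
-- what changed: Replaces the per-index prepend-space branch (counter + conditional space before each appended token) with the classic generator-based join: an inner generator glues punctuation tokens onto the preceding group and the result is ' '.join(groups).
import Mathlib
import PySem

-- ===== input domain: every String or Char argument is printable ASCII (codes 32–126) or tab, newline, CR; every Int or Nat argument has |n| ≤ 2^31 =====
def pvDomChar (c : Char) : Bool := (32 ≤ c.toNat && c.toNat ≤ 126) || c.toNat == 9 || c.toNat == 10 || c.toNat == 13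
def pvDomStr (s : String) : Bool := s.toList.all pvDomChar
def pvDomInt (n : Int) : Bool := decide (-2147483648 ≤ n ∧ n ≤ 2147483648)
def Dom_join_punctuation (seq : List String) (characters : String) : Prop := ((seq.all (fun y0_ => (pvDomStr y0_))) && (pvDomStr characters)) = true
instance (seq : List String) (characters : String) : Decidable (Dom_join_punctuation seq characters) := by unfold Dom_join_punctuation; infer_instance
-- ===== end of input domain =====

-- B replaces A's per-index counter-and-prepend-space loop with the idiomatic generator-based
-- join: punctuation tokens are glued onto the preceding group and the groups are ' '-joined.

-- ===== PORT A =====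
-- A: accumulate text (as List Char) and a counter; space before nxt unless nxt in characters or count == 0.
def join_punctuation (seq : List String) (characters : String) : String :=
  String.ofList
    ((seq.foldl
        (fun st nxt =>
          if PySem.Str.isIn nxt characters || st.2 == 0 then
            (st.1 ++ nxt.toList, st.2 + 1)
          else
            (st.1 ++ (' ' :: nxt.toList), st.2 + 1))
        (([] : List Char), (0 : Nat))).1)

-- ===== PORT B =====
-- B's generator: emits the list of groups (each group = a token plus its trailing punctuation tokens).
def jpAltGroups (characters : String) : List String → List Char → List (List Char)
  | [], current => [current]
  | nxt :: rest, current =>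
    if PySem.Str.isIn nxt characters then
      jpAltGroups characters rest (current ++ nxt.toList)
    else
      current :: jpAltGroups characters rest nxt.toList

def join_punctuation_alt (seq : List String) (characters : String) : String :=
  match seq with
  | [] => ""
  | x :: rest => String.ofList (PySem.Chars.join [' '] (jpAltGroups characters rest x.toList))

-- ===== PRECONDITION & SPEC =====
def Spec_join_punctuation (seq : List String) (characters : String) (out : String) : Prop := out = join_punctuation_alt seq characters
instance (seq : List String) (characters : String) (out : String) : Decidable (Spec_join_punctuation seq characters out) := by unfold Spec_join_punctuation; infer_instance

-- ===== CLAIM (what is proved, stated in full; the proofs are below) =====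
def Claim_equal_join_punctuation : Prop := ∀ (seq : List String) (characters : String), Dom_join_punctuation seq characters → Spec_join_punctuation seq characters (join_punctuation seq characters)

-- ===== LEMMAS AND PROOFS =====

-- the common normal form: first token, then each later token with a space unless it is punctuation
def jpSpecChars (characters : String) (rest : List String) (first : List Char) : List Char :=
  first ++ rest.flatMap (fun nxt =>
    if PySem.Str.isIn nxt characters then nxt.toList else ' ' :: nxt.toList)

lemma jpAltGroups_ne_nil (characters : String) (rest : List String) (current : List Char) :
    jpAltGroups characters rest current ≠ [] := by
  induction rest generalizing current with
  | nil => simp [jpAltGroups]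
  | cons nxt rest ih =>
    simp only [jpAltGroups]
    split_ifs
    · exact ih _
    · simp

lemma jpAlt_eq_spec (characters : String) (rest : List String) (current : List Char) :
    PySem.Chars.join [' '] (jpAltGroups characters rest current) =
      jpSpecChars characters rest current := by
  induction rest generalizing current with
  | nil => simp [jpAltGroups, jpSpecChars, PySem.Chars.join_singleton]
  | cons nxt rest ih =>
    simp only [jpAltGroups, jpSpecChars]
    split_ifs with h
    · rw [ih]
      have hC : PySem.Chars.isIn nxt.toList characters.toList = true := by simpa using h
      simp [jpSpecChars, hC]
    · have hC : PySem.Chars.isIn nxt.toList characters.toList = false := by simpa using h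
      obtain ⟨g, gs, hg⟩ := List.exists_cons_of_ne_nil (jpAltGroups_ne_nil characters rest nxt.toList)
      rw [hg, PySem.Chars.join_cons_cons, ← hg, ih]
      simp [jpSpecChars, hC]

lemma jpA_foldl_eq_spec (characters : String) (rest : List String) (text : List Char) (count : Nat) :
    (rest.foldl
        (fun st nxt =>
          if PySem.Str.isIn nxt characters || st.2 == 0 then
            (st.1 ++ nxt.toList, st.2 + 1)
          else
            (st.1 ++ (' ' :: nxt.toList), st.2 + 1))
        (text, count + 1)).1 = jpSpecChars characters rest text := by
  induction rest generalizing text count with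
  | nil => simp [jpSpecChars]
  | cons nxt rest ih =>
    simp only [List.foldl_cons, jpSpecChars]
    split_ifs with h
    · have h' : PySem.Str.isIn nxt characters = true := by
        rcases Bool.or_eq_true_iff.mp h with h | h
        · exact h
        · exact absurd h (by simp)
      have hC : PySem.Chars.isIn nxt.toList characters.toList = true := by simpa using h'
      rw [ih]
      simp [jpSpecChars, hC]
    · have h' : PySem.Str.isIn nxt characters = false := by
        cases hc : PySem.Str.isIn nxt characters
        · rfl
        · exact absurd (Bool.or_eq_true_iff.mpr (Or.inl hc)) h
      have hC : PySem.Chars.isIn nxt.toList characters.toList = false := by simpa using h'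
      rw [ih]
      simp [jpSpecChars, hC]

-- ===== VERDICT (by name: the statement is the Claim_ definition above) =====
theorem join_punctuation_spec : Claim_equal_join_punctuation := by
  intro seq characters _
  unfold Spec_join_punctuation join_punctuation join_punctuation_alt
  cases seq with
  | nil => rfl
  | cons x rest =>
    simp only [List.foldl_cons, List.nil_append, if_pos (by simp : (PySem.Str.isIn x characters || (0:Nat) == 0) = true)]
    rw [jpA_foldl_eq_spec characters rest x.toList 0, jpAlt_eq_spec]
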